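-- pv_equiv track=rewrite | github.com/pypi-data/pypi-mirror-399 | packages/turboseo/turboseo-0.2.0-py3-none-any.whl/turboseo/analyzers/seo_score.py | _prioritize_issues
-- ===== SOURCE A (Python) =====
-- def _prioritize_issues(
--     all_issues: list[tuple[str, int]],
-- ) -> tuple[list[str], list[str], list[str]]:
--     """
--     Prioritize issues by impact.
--
--     Args:
--         all_issues: List of (issue_text, point_impact) tuples
--
--     Returns:
--         Tuple of (critical, warnings, suggestions)
--     """
--     critical = []
--     warnings = []
--     suggestions = []
--
--     for issue, impact in all_issues:
--         if impact >= 25: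
--             critical.append(issue)
--         elif impact >= 10:
--             warnings.append(issue)
--         else:
--             suggestions.append(issue)
--
--     return critical, warnings, suggestions
-- ===== SOURCE B (Python) =====
-- def _prioritize_issues(all_issues):
--     def band(impact):
--         return 0 if impact >= 25 else 1 if impact >= 10 else 2
--     ordered = sorted(all_issues, key=lambda p: band(p[1]))
--     texts = [issue for issue, _ in ordered]
--     k0 = sum(1 for _, impact in all_issues if impact >= 25)
--     k1 = k0 + sum(1 for _, impact in all_issues if 10 <= impact < 25)
--     return texts[:k0], texts[k0:k1], texts[k1:]
-- ===== Notes on version B (the rewrite author's own statement) =====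
-- stated objective: alternative
-- what changed: Instead of dispatching each issue into one of three accumulators, B stably sorts the issues by severity band (0/1/2), counts the band sizes, and slices the sorted text list at the two counted boundaries; stability of Python's sort preserves the in-band order.
import Mathlib
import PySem

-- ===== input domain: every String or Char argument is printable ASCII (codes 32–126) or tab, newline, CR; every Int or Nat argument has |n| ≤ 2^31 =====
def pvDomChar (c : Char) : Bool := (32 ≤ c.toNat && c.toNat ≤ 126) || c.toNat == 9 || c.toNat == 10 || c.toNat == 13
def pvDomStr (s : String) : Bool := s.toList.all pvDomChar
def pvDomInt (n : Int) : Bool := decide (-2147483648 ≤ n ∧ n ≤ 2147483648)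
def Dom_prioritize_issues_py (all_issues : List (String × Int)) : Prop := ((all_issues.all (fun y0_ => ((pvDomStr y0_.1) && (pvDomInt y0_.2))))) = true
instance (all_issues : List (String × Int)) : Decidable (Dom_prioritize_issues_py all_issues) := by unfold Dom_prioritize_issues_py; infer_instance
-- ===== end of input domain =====

-- B replaces A's single dispatching loop by a stable sort on the severity band followed by
-- counted slicing; same return value (alternative decomposition, no speed claim).

-- ===== PORT A =====
-- Port of A: one fold over the list carrying the three accumulators.
def prioritize_issues_py (all_issues : List (String × Int)) : List String × List String × List String :=
  (all_issues.foldl (fun acc p =>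
      let (critical, warnings, suggestions) := acc
      let (issue, impact) := p
      if impact ≥ 25 then (critical ++ [issue], warnings, suggestions)
      else if impact ≥ 10 then (critical, warnings ++ [issue], suggestions)
      else (critical, warnings, suggestions ++ [issue]))
    ([], [], []))

-- ===== PORT B =====
-- Port of B's helper band(impact).
def pvBand (impact : Int) : Int :=
  if impact ≥ 25 then 0 else if impact ≥ 10 then 1 else 2

-- Port of B: stable sort by band, count the first two bands, slice the text list.
def prioritize_issues_py_alt (all_issues : List (String × Int)) : List String × List String × List String :=
  let ordered := PySem.List.sorted all_issues (fun p => pvBand p.2)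
  let texts := ordered.map Prod.fst
  let k0 : Int := all_issues.foldl (fun n p => if p.2 ≥ 25 then n + 1 else n) 0
  let k1 : Int := k0 + all_issues.foldl (fun n p => if 10 ≤ p.2 ∧ p.2 < 25 then n + 1 else n) 0
  (PySem.List.slice texts none (some k0),
   PySem.List.slice texts (some k0) (some k1),
   PySem.List.slice texts (some k1) none)

-- ===== PRECONDITION & SPEC =====
def Spec_prioritize_issues_py (all_issues : List (String × Int)) (out : List String × List String × List String) : Prop := out = prioritize_issues_py_alt all_issues
instance (all_issues : List (String × Int)) (out : List String × List String × List String) : Decidable (Spec_prioritize_issues_py all_issues out) := by unfold Spec_prioritize_issues_py; infer_instance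

-- ===== CLAIM (what is proved, stated in full; the proofs are below) =====
def Claim_equal_prioritize_issues_py : Prop := ∀ (all_issues : List (String × Int)), Dom_prioritize_issues_py all_issues → Spec_prioritize_issues_py all_issues (prioritize_issues_py all_issues)

-- ===== LEMMAS AND PROOFS =====

-- band predicates
def pvC0 (p : String × Int) : Bool := decide (p.2 ≥ 25)
def pvC1 (p : String × Int) : Bool := decide (10 ≤ p.2 ∧ p.2 < 25)
def pvC2 (p : String × Int) : Bool := decide (p.2 < 10)

-- the three filtered segments, concatenated in band order
def pvSeg (xs : List (String × Int)) : List (String × Int) :=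
  xs.filter pvC0 ++ xs.filter pvC1 ++ xs.filter pvC2

-- insertBy passes through a prefix none of whose elements compare after x
theorem pvIns_pass {α : Type} (before : α → α → Bool) (x : α) (l1 l2 : List α)
    (h : ∀ y ∈ l1, before x y = false) :
    PySem.List.insertBy before x (l1 ++ l2) = l1 ++ PySem.List.insertBy before x l2 := by
  induction l1 with
  | nil => simp
  | cons a t ih =>
    have ha := h a (by simp)
    simp [PySem.List.insertBy, ha, ih (fun y hy => h y (by simp [hy]))]

-- insertBy puts x in front when every element compares after x
theorem pvIns_front {α : Type} (before : α → α → Bool) (x : α) (l : List α)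
    (h : ∀ y ∈ l, before x y = true) :
    PySem.List.insertBy before x l = x :: l := by
  cases l with
  | nil => simp [PySem.List.insertBy]
  | cons a t => simp [PySem.List.insertBy, h a (by simp)]

-- stability: the stable sort by band is exactly the three filtered segments in band order
theorem pvSorted_eq (xs : List (String × Int)) :
    PySem.List.sorted xs (fun p => pvBand p.2) = pvSeg xs := by
  rw [PySem.List.sorted_eq_foldl_insertBy]
  have main : ∀ (l ys : List (String × Int)),
      l.foldl (fun acc x => PySem.List.insertBy
        (fun a b => decide (pvBand a.2 < pvBand b.2)) x acc) (pvSeg ys)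
      = pvSeg (ys ++ l) := by
    intro l
    induction l with
    | nil => simp
    | cons x t ih =>
      intro ys
      have step : PySem.List.insertBy (fun a b => decide (pvBand a.2 < pvBand b.2)) x (pvSeg ys)
          = pvSeg (ys ++ [x]) := by
        have m0 : ∀ y ∈ ys.filter pvC0, pvBand y.2 = 0 := by
          intro y hy
          have := (List.mem_filter.mp hy).2
          simp [pvC0] at this
          simp [pvBand, this]
        have m1 : ∀ y ∈ ys.filter pvC1, pvBand y.2 = 1 := by
          intro y hy
          have := (List.mem_filter.mp hy).2
          simp [pvC1] at this
          simp [pvBand, show ¬ y.2 ≥ 25 by omega, this.1]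
        have m2 : ∀ y ∈ ys.filter pvC2, pvBand y.2 = 2 := by
          intro y hy
          have := (List.mem_filter.mp hy).2
          simp [pvC2] at this
          simp [pvBand, show ¬ y.2 ≥ 25 by omega, show ¬ y.2 ≥ 10 by omega]
        by_cases h1 : x.2 ≥ 25
        · have hb : pvBand x.2 = 0 := by simp [pvBand, h1]
          rw [pvSeg, List.append_assoc,
              pvIns_pass _ _ _ _ (by intro y hy; simp [hb, m0 y hy]),
              pvIns_front _ _ _ (by
                intro y hy
                rcases List.mem_append.mp hy with hy | hy
                · simp [hb, m1 y hy]
                · simp [hb, m2 y hy])]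
          simp [pvSeg, List.filter_append, pvC0, pvC1, pvC2, h1,
            show ¬ (10 ≤ x.2 ∧ x.2 < 25) by omega, show ¬ x.2 < 10 by omega]
        · by_cases h2 : x.2 ≥ 10
          · have hb : pvBand x.2 = 1 := by simp [pvBand, h1, h2]
            rw [pvSeg,
                pvIns_pass _ _ _ _ (by
                  intro y hy
                  rcases List.mem_append.mp hy with hy | hy
                  · simp [hb, m0 y hy]
                  · simp [hb, m1 y hy]),
                pvIns_front _ _ _ (by intro y hy; simp [hb, m2 y hy])]
            simp [pvSeg, List.filter_append, pvC0, pvC1, pvC2, h1,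
              show 10 ≤ x.2 ∧ x.2 < 25 by omega, show ¬ x.2 < 10 by omega]
          · have hb : pvBand x.2 = 2 := by simp [pvBand, h1, h2]
            rw [pvSeg,
                PySem.List.insertBy_of_forall_not_before _ _ _ (by
                  intro y hy
                  rcases List.mem_append.mp hy with hy | hy
                  · rcases List.mem_append.mp hy with hy | hy
                    · simp [hb, m0 y hy]
                    · simp [hb, m1 y hy]
                  · simp [hb, m2 y hy])]
            simp [pvSeg, List.filter_append, pvC0, pvC1, pvC2, h1, h2,
              show x.2 < 10 by omega]
      simp only [List.foldl_cons, step, ih (ys ++ [x]), List.append_assoc, List.cons_append,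
        List.nil_append]
  have := main xs []
  simpa [pvSeg] using this

-- the two counting folds compute the lengths of the first two segments
theorem pvCount (xs : List (String × Int)) (c : (String × Int) → Prop)
    [DecidablePred c] (n : Int) :
    xs.foldl (fun n p => if c p then n + 1 else n) n
      = n + ((xs.filter (fun p => decide (c p))).length : Int) := by
  induction xs generalizing n with
  | nil => simp
  | cons a t ih =>
    by_cases h : c a
    · simp [h, ih]; omega
    · simp [h, ih]

-- A's fold equals the filtered/mapped triple (invariant on the accumulator)
theorem pvFoldA (all_issues : List (String × Int)) (c w s : List String) :
    all_issues.foldl (fun acc p =>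
      let (critical, warnings, suggestions) := acc
      let (issue, impact) := p
      if impact ≥ 25 then (critical ++ [issue], warnings, suggestions)
      else if impact ≥ 10 then (critical, warnings ++ [issue], suggestions)
      else (critical, warnings, suggestions ++ [issue])) (c, w, s)
    = (c ++ (all_issues.filter pvC0).map Prod.fst,
       w ++ (all_issues.filter pvC1).map Prod.fst,
       s ++ (all_issues.filter pvC2).map Prod.fst) := by
  induction all_issues generalizing c w s with
  | nil => simp
  | cons hd tl ih =>
    obtain ⟨issue, impact⟩ := hd
    by_cases h1 : impact ≥ 25
    · simp [List.foldl, h1, ih, List.filter, pvC0, pvC1, pvC2,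
        show ¬(impact < 10) by omega, show ¬(10 ≤ impact ∧ impact < 25) by omega]
    · by_cases h2 : impact ≥ 10
      · simp [List.foldl, h1, h2, ih, List.filter, pvC0, pvC1, pvC2,
          show ¬(impact < 10) by omega, show 10 ≤ impact ∧ impact < 25 by omega]
      · simp [List.foldl, h1, h2, ih, List.filter, pvC0, pvC1, pvC2,
          show impact < 10 by omega]

-- ===== VERDICT (by name: the statement is the Claim_ definition above) =====
theorem prioritize_issues_py_spec : Claim_equal_prioritize_issues_py := by
  intro all_issues _
  unfold Spec_prioritize_issues_py prioritize_issues_py prioritize_issues_py_alt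
  rw [pvFoldA, pvSorted_eq]
  set m0 := (all_issues.filter pvC0).map Prod.fst with hm0
  set m1 := (all_issues.filter pvC1).map Prod.fst with hm1
  set m2 := (all_issues.filter pvC2).map Prod.fst with hm2
  have htexts : (pvSeg all_issues).map Prod.fst = m0 ++ m1 ++ m2 := by
    simp [pvSeg, hm0, hm1, hm2]
  have hk0 : all_issues.foldl (fun n p => if p.2 ≥ 25 then n + 1 else n) 0
      = (m0.length : Int) := by
    rw [pvCount all_issues (fun p => p.2 ≥ 25) 0,
        show (all_issues.filter fun p => decide (p.2 ≥ 25)) = all_issues.filter pvC0 from rfl,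
        hm0]
    simp
  have hk1 : all_issues.foldl (fun n p => if 10 ≤ p.2 ∧ p.2 < 25 then n + 1 else n) 0
      = (m1.length : Int) := by
    rw [pvCount all_issues (fun p => 10 ≤ p.2 ∧ p.2 < 25) 0,
        show (all_issues.filter fun p => decide (10 ≤ p.2 ∧ p.2 < 25))
          = all_issues.filter pvC1 from rfl,
        hm1]
    simp
  have e1 : PySem.List.slice (m0 ++ (m1 ++ m2)) none (some (m0.length : Int)) = m0 := by
    rw [PySem.List.slice_to_natCast, List.take_left]
  have e2 : PySem.List.slice (m0 ++ (m1 ++ m2)) (some (m0.length : Int))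
      (some ((m0.length : Int) + (m1.length : Int))) = m1 := by
    rw [PySem.List.slice_natCast_add, List.drop_left, List.take_left]
  have e3 : PySem.List.slice (m0 ++ (m1 ++ m2)) (some ((m0.length : Int) + (m1.length : Int)))
      none = m2 := by
    rw [← Int.natCast_add, PySem.List.slice_from_natCast,
        show m0.length + m1.length = (m0 ++ m1).length by simp, ← List.append_assoc,
        List.drop_left]
  simp only [htexts, hk0, hk1]
  simp [e1, e2, e3]
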